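-- pv_equiv track=rewrite | github.com/CarlosOrqueda/TP1 | funciones_nuevas.py | iterar_listas
-- ===== SOURCE A (Python) =====
-- def iterar_listas(lista_de_palabras):
--     palabra_corta = lista_de_palabras[0]  # Asigno primera palabra de la lista a la variable
--     lista_auxiliar = []
--     for palabra in lista_de_palabras:
--         if len(palabra_corta) == len(palabra):
--             lista_auxiliar.append(palabra)
--             palabra_corta = palabra
--         elif len(palabra_corta) > len(palabra):
--             del lista_auxiliar[::]
--             palabra_corta = palabra
--             lista_auxiliar.append(palabra_corta)
--     return palabra_corta, lista_auxiliar
-- ===== SOURCE B (Python) =====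
-- def iterar_listas(lista_de_palabras):
--     minimo = min(len(p) for p in lista_de_palabras)
--     lista_auxiliar = [p for p in lista_de_palabras if len(p) == minimo]
--     return lista_auxiliar[-1], lista_auxiliar
-- ===== Notes on version B (the rewrite author's own statement) =====
-- stated objective: simpler
-- what changed: Replaces A's single-pass accumulator with reset-on-new-minimum by a min-then-filter decomposition: compute the minimum length, filter the words of that length, and return the last of them.
import Mathlib
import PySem

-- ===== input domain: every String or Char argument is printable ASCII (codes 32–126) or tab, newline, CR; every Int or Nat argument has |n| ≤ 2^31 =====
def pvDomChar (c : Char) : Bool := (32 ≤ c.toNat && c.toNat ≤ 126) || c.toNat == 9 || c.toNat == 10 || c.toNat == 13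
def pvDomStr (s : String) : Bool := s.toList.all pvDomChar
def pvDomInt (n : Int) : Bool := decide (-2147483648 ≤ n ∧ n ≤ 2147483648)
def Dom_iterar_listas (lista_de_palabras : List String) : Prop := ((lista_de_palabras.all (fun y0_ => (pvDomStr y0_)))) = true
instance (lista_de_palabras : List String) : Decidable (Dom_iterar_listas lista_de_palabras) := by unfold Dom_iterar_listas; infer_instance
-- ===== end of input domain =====

-- B replaces A's single-pass accumulator-with-reset by a min-then-filter decomposition (same cost, simpler); return values proved equal on every nonempty list.


-- ===== PORT A =====
-- one loop iteration of A: same-length → append & update, shorter → reset list, else keep state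
def pvStepA (s : String × List String) (palabra : String) : String × List String :=
  if PySem.Str.len s.1 = PySem.Str.len palabra then (palabra, s.2 ++ [palabra])
  else if PySem.Str.len s.1 > PySem.Str.len palabra then (palabra, [palabra])
  else s

def iterar_listas (lista_de_palabras : List String) : String × List String :=
  -- lista_de_palabras[0] raises IndexError on []; Pre_ excludes that input
  let st := lista_de_palabras.foldl pvStepA (lista_de_palabras.headD "", [])
  (st.1, st.2)

-- ===== PORT B =====
def iterar_listas_alt (lista_de_palabras : List String) : String × List String :=
  -- min(...) raises ValueError on []; Pre_ excludes that input
  let minimo := (PySem.List.min? (lista_de_palabras.map PySem.Str.len) (fun x => x)).getD 0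
  let lista_auxiliar := lista_de_palabras.filter (fun p => decide (PySem.Str.len p = minimo))
  (PySem.List.pyGetD lista_auxiliar (-1) "", lista_auxiliar)

-- ===== PRECONDITION & SPEC =====
-- Pre_: A raises IndexError (and B ValueError) on the empty list; both return on every nonempty list.
def Pre_iterar_listas (lista_de_palabras : List String) : Prop := lista_de_palabras ≠ []
instance (lista_de_palabras : List String) : Decidable (Pre_iterar_listas lista_de_palabras) := by unfold Pre_iterar_listas; infer_instance
def pvWitness_iterar_listas : List String := ["ab", "c", "de", "f"]

def Spec_iterar_listas (lista_de_palabras : List String) (out : String × List String) : Prop := out = iterar_listas_alt lista_de_palabras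
instance (lista_de_palabras : List String) (out : String × List String) : Decidable (Spec_iterar_listas lista_de_palabras out) := by unfold Spec_iterar_listas; infer_instance

-- ===== CLAIM (what is proved, stated in full; the proofs are below) =====
def Claim_equal_iterar_listas : Prop := ∀ (lista_de_palabras : List String), Dom_iterar_listas lista_de_palabras → Pre_iterar_listas lista_de_palabras → Spec_iterar_listas lista_de_palabras (iterar_listas lista_de_palabras)

-- ===== LEMMAS AND PROOFS =====

-- the minimum word length of a nonempty list, as B computes it
def pvMinLen (l : List String) : Int := (PySem.List.min? (l.map PySem.Str.len) (fun x => x)).getD 0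

-- the words of minimum length, as B computes them
def pvF (l : List String) : List String := l.filter (fun p => decide (PySem.Str.len p = pvMinLen l))

lemma pvGetLastD_mem (l : List String) (h : l ≠ []) : l.getLastD "" ∈ l := by
  rw [List.getLastD_eq_getLast?]
  rcases hx : l.getLast? with _ | a
  · exact absurd (List.getLast?_eq_none_iff.1 hx) h
  · simpa using List.mem_of_getLast? hx

lemma pvMinLen_isMin (l : List String) (hl : l ≠ []) : ∀ p ∈ l, pvMinLen l ≤ PySem.Str.len p := by
  intro p hp
  have hm : l.map PySem.Str.len ≠ [] := by simp [hl]
  obtain ⟨m, hmeq⟩ := Option.ne_none_iff_exists'.1 (by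
    rw [Ne, PySem.List.min?_eq_none_iff]; exact hm :
    PySem.List.min? (l.map PySem.Str.len) (fun x => x) ≠ none)
  have := PySem.List.min?_isMin hmeq (PySem.Str.len p) (List.mem_map_of_mem hp)
  simpa [pvMinLen, hmeq] using this

lemma pvMinLen_mem (l : List String) (hl : l ≠ []) : ∃ p ∈ l, PySem.Str.len p = pvMinLen l := by
  have hm : l.map PySem.Str.len ≠ [] := by simp [hl]
  obtain ⟨m, hmeq⟩ := Option.ne_none_iff_exists'.1 (by
    rw [Ne, PySem.List.min?_eq_none_iff]; exact hm :
    PySem.List.min? (l.map PySem.Str.len) (fun x => x) ≠ none)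
  obtain ⟨p, hp, hpl⟩ := List.mem_map.1 (PySem.List.min?_mem hmeq)
  refine ⟨p, hp, ?_⟩
  rw [hpl, pvMinLen, hmeq, Option.getD_some]

lemma pvF_ne_nil (l : List String) (hl : l ≠ []) : pvF l ≠ [] := by
  obtain ⟨p, hp, hpl⟩ := pvMinLen_mem l hl
  intro h
  have hmem : p ∈ pvF l := List.mem_filter.2 ⟨hp, by simpa using hpl⟩
  simp [h] at hmem

lemma pvF_mem_len (l : List String) (p : String) (hp : p ∈ pvF l) :
    PySem.Str.len p = pvMinLen l := by
  have := (List.mem_filter.1 hp).2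
  simpa [PySem.Str.len_eq] using this

lemma pvMinLen_cons_append (p : String) (rest : List String) (x : String) :
    pvMinLen ((p :: rest) ++ [x]) = min (pvMinLen (p :: rest)) (PySem.Str.len x) := by
  simp [pvMinLen, PySem.List.min?_id_cons, List.foldl_append]

-- characterisation of A's loop: for nonempty l the state is (last shortest word, the shortest words)
lemma loopA_eq (l : List String) (hl : l ≠ []) :
    l.foldl pvStepA (l.headD "", []) = ((pvF l).getLastD "", pvF l) := by
  induction l using List.reverseRecOn with
  | nil => exact absurd rfl hl
  | append_singleton ys x ih =>
    rcases eq_or_ne ys [] with hys | hys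
    · subst hys
      simp [pvStepA, pvF, pvMinLen, PySem.List.min?_id_cons]
    · obtain ⟨p, rest, rfl⟩ := List.exists_cons_of_ne_nil hys
      have hx' : PySem.Str.len x = (x.length : Int) := by simp [PySem.Str.len_eq]
      have hlastlen : PySem.Str.len ((pvF (p :: rest)).getLastD "") = pvMinLen (p :: rest) :=
        pvF_mem_len _ _ (pvGetLastD_mem _ (pvF_ne_nil (p :: rest) hys))
      have hmin := pvMinLen_isMin (p :: rest) hys
      rw [List.foldl_append]
      have hhead : ((p :: rest) ++ [x]).headD "" = (p :: rest).headD "" := by simp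
      rw [hhead, ih hys]
      have hM := pvMinLen_cons_append p rest x
      rcases lt_trichotomy (PySem.Str.len x) (pvMinLen (p :: rest)) with hlt | heq | hgt
      · -- x strictly shorter: A resets the list; B's minimum drops, the old words are filtered out
        have hMx : pvMinLen ((p :: rest) ++ [x]) = PySem.Str.len x := by rw [hM]; omega
        have hfilter : (p :: rest).filter
            (fun q => decide (PySem.Str.len q = pvMinLen ((p :: rest) ++ [x]))) = [] := by
          rw [List.filter_eq_nil_iff]
          intro q hq
          have h1 := hmin q hq
          have h2 : PySem.Str.len q ≠ pvMinLen ((p :: rest) ++ [x]) := by rw [hMx]; omega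
          simpa [PySem.Str.len_eq] using h2
        have hF : pvF ((p :: rest) ++ [x]) = [x] := by
          rw [pvF, List.filter_append, hfilter]
          simp only [List.filter_cons, List.filter_nil]
          rw [decide_eq_true (by omega : PySem.Str.len x = pvMinLen ((p :: rest) ++ [x]))]
          rfl
        simp only [pvStepA, List.foldl_cons, List.foldl_nil]
        rw [if_neg (by omega), if_pos (by omega), hF]
        rfl
      · -- equal length: A appends x; B keeps the old words and adds x
        have hMx : pvMinLen ((p :: rest) ++ [x]) = pvMinLen (p :: rest) := by rw [hM]; omega
        have hF : pvF ((p :: rest) ++ [x]) = pvF (p :: rest) ++ [x] := by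
          rw [pvF, List.filter_append, pvF, hMx]
          simp only [List.filter_cons, List.filter_nil]
          rw [decide_eq_true (by omega : PySem.Str.len x = pvMinLen (p :: rest))]
          rfl
        simp only [pvStepA, List.foldl_cons, List.foldl_nil]
        rw [if_pos (by omega), hF]
        simp
      · -- x strictly longer: A keeps the state; x is filtered out by B
        have hMx : pvMinLen ((p :: rest) ++ [x]) = pvMinLen (p :: rest) := by rw [hM]; omega
        have hF : pvF ((p :: rest) ++ [x]) = pvF (p :: rest) := by
          rw [pvF, List.filter_append, pvF, hMx]
          have hne' : PySem.Str.len x ≠ pvMinLen (p :: rest) := by omega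
          simp only [List.filter_cons, List.filter_nil]
          rw [decide_eq_false hne']
          simp
        simp only [pvStepA, List.foldl_cons, List.foldl_nil]
        rw [if_neg (by omega), if_neg (by omega), hF]

-- ===== VERDICT (by name: the statement is the Claim_ definition above) =====
theorem iterar_listas_spec : Claim_equal_iterar_listas := by
  intro l _ hPre
  unfold Spec_iterar_listas
  have hne := pvF_ne_nil l hPre
  have h1 : iterar_listas l = ((pvF l).getLastD "", pvF l) := by
    unfold iterar_listas
    rw [loopA_eq l hPre]
  have h2 : iterar_listas_alt l = (PySem.List.pyGetD (pvF l) (-1) "", pvF l) := rfl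
  rw [h1, h2, PySem.List.pyGetD_neg_one _ _ hne]
  rw [List.getLastD_eq_getLast?, List.getLast?_eq_some_getLast hne, Option.getD_some]
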